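-- pv_equiv track=rewrite | github.com/GaryW123/Simulator-for-Pipelined-Processor | hm1/MIPSsim.py | com2ori
-- ===== SOURCE A (Python) =====
-- def com2ori(ori_str: str):
--     # 如果符号位为正，则原码与补码相同
--     if ori_str[0] == '0':
--         return ori_str
--     elif ori_str[0] == '1':#负数 取反加一
--         value_str = ""
--         # 数值位按位取反
--         for i in range(len(ori_str)):
--             value_str+='1' if ori_str[i] == '0' else '0'
--         # 数值位加 1
--         n = int(value_str, 2) + 1
--         com_str = bin(n)[2:]
--         if len(com_str) >= len(ori_str):
--             # 说明进位到符号位了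
--             com_str = '0' + com_str[1:]
--         else:
--             # 0不够，中间填充0
--             n = len(ori_str) - len(com_str) - 1
--             for i in range(n):
--                 com_str = '0' + com_str
--             com_str = '1' + com_str
--         return com_str
-- ===== SOURCE B (Python) =====
-- def com2ori(ori_str: str):
--     # Negative case done by one arithmetic computation instead of two loops.
--     if ori_str[0] == '0':
--         return ori_str
--     elif ori_str[0] == '1':
--         L = len(ori_str)
--         mag = (1 << L) - int(ori_str, 2)   # two's-complement magnitude
--         if mag == 1 << (L - 1):
--             # most-negative value: carry reaches the sign bit
--             return '0' * L
--         return '1' + format(mag, '0%db' % (L - 1))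
-- ===== Notes on version B (the rewrite author's own statement) =====
-- stated objective: simpler
-- what changed: Replaces the bit-by-bit inversion loop, the +1, bin() re-stringification and the zero-padding loop by one arithmetic computation: mag = (1<<L) - int(s,2), with the carry/most-negative case detected by an equality test and the result produced by format zero-padding; Pre_ excludes the empty string (A raises IndexError), strings whose first character is not a binary digit (A returns None, not a string), and sign-bit-set strings containing a non-binary character, where A silently treats every such character as a one bit while B's int(s,2) raises ValueError.
-- outside the precondition, e.g. on com2ori('1a'): A returns '11', B raises ValueError; on com2ori('abc'): A returns None, B returns None; on com2ori(''): A raises IndexError, B raises IndexError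
import Mathlib
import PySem

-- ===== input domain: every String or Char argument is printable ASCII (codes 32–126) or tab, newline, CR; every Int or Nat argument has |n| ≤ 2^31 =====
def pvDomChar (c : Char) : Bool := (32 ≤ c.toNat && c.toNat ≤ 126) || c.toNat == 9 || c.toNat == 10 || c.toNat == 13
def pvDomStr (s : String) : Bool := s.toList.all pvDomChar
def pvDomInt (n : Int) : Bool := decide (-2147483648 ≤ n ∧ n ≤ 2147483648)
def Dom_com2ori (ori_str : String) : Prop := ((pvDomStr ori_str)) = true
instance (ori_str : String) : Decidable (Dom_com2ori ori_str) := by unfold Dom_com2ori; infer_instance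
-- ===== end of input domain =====

-- B replaces A's bit-inversion loop, +1, bin() and zero-padding loop by one arithmetic
-- computation mag = (1 << L) - int(s, 2) with a single equality test for the carry case (objective: simpler).


-- ===== PORT A =====
-- int(s, 2) for the nonempty '0'/'1' digit strings that occur under Pre_ (exact there;
-- the general int(.,2) syntax — whitespace, sign, '0b' prefix, underscores — never occurs).
def pvParseBin (cs : List Char) : Nat :=
  cs.foldl (fun a c => 2 * a + (if c = '1' then 1 else 0)) 0

def com2ori (ori_str : String) : String :=
  match PySem.List.pyGet? ori_str.toList 0 with
  | none => ""      -- ori_str[0] on "": IndexError (outside Pre_)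
  | some c0 =>
    if c0 = '0' then ori_str
    else if c0 = '1' then
      -- for i in range(len(ori_str)): value_str += '1' if ori_str[i] == '0' else '0'
      let value_str := ori_str.toList.foldl (fun acc ch => acc ++ [if ch = '0' then '1' else '0']) []
      let n := pvParseBin value_str + 1
      let com_str := Nat.toDigits 2 n          -- bin(n)[2:] for n ≥ 0 (= PySem.Int.toBinChars n)
      if com_str.length ≥ ori_str.toList.length then
        String.mk ('0' :: com_str.drop 1)      -- com_str = '0' + com_str[1:]
      else
        let p := ori_str.toList.length - com_str.length - 1
        String.mk ('1' :: (List.range p).foldl (fun s _ => '0' :: s) com_str)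
    else ""  -- Python returns None here (outside Pre_)

-- ===== PORT B =====
def com2ori_alt (ori_str : String) : String :=
  match PySem.List.pyGet? ori_str.toList 0 with
  | none => ""      -- ori_str[0] on "": IndexError (outside Pre_)
  | some c0 =>
    if c0 = '0' then ori_str
    else if c0 = '1' then
      let L := ori_str.toList.length
      let mag := 2 ^ L - pvParseBin ori_str.toList   -- (1 << L) - int(ori_str, 2); int(.,2) exact on the binary strings Pre_ admits
      if mag = 2 ^ (L - 1) then
        String.mk (List.replicate L '0')             -- '0' * L
      else
        -- '1' + format(mag, '0%db' % (L-1)): binary digits of mag zero-padded to width L-1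
        let b := Nat.toDigits 2 mag
        String.mk ('1' :: (List.replicate ((L - 1) - b.length) '0' ++ b))
    else ""  -- Python returns None here (outside Pre_)

-- ===== PRECONDITION & SPEC =====
-- Pre_ excludes: the empty string (A raises IndexError), strings whose first character is not a
-- binary digit (A returns None, not a string), and sign-bit-set strings containing a non-binary
-- character, where A's inversion silently treats every such character as a one bit while B's
-- int(ori_str, 2) raises ValueError.
def Pre_com2ori (ori_str : String) : Prop :=
  ori_str.toList ≠ [] ∧
    (ori_str.toList.head? = some '0' ∨
      (ori_str.toList.head? = some '1' ∧
        ori_str.toList.all (fun ch => ch == '0' || ch == '1') = true))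
instance (ori_str : String) : Decidable (Pre_com2ori ori_str) := by unfold Pre_com2ori; infer_instance
def pvWitness_com2ori : String := "10"

def Spec_com2ori (ori_str : String) (out : String) : Prop := out = com2ori_alt ori_str
instance (ori_str : String) (out : String) : Decidable (Spec_com2ori ori_str out) := by unfold Spec_com2ori; infer_instance

-- ===== CLAIM (what is proved, stated in full; the proofs are below) =====
def Claim_equal_com2ori : Prop := ∀ (ori_str : String), Dom_com2ori ori_str → Pre_com2ori ori_str → Spec_com2ori ori_str (com2ori ori_str)

-- ===== LEMMAS AND PROOFS =====

theorem pvParseBin_acc (cs : List Char) :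
    ∀ a : Nat, cs.foldl (fun a c => 2 * a + (if c = '1' then 1 else 0)) a
      = a * 2 ^ cs.length + pvParseBin cs := by
  induction cs with
  | nil => intro a; simp [pvParseBin]
  | cons c t ih =>
    intro a
    have hp : pvParseBin (c :: t)
        = (2 * 0 + (if c = '1' then 1 else 0)) * 2 ^ t.length + pvParseBin t :=
      ih (2 * 0 + (if c = '1' then 1 else 0))
    simp only [List.foldl_cons, List.length_cons]
    rw [ih (2 * a + (if c = '1' then 1 else 0)), hp, pow_succ]
    ring

theorem pvParseBin_cons (c : Char) (t : List Char) :
    pvParseBin (c :: t) = (if c = '1' then 1 else 0) * 2 ^ t.length + pvParseBin t := by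
  simp only [pvParseBin, List.foldl_cons]
  simpa using pvParseBin_acc t (2 * 0 + (if c = '1' then 1 else 0))

theorem pvParseBin_lt (cs : List Char) : pvParseBin cs < 2 ^ cs.length := by
  induction cs with
  | nil => simp [pvParseBin]
  | cons c t ih =>
    rw [pvParseBin_cons]
    have : (if c = '1' then 1 else 0) ≤ 1 := by split <;> omega
    simp only [List.length_cons, pow_succ]
    nlinarith

theorem pvParseBin_inv (cs : List Char) (hb : ∀ ch ∈ cs, ch = '0' ∨ ch = '1') :
    pvParseBin (cs.map (fun ch => if ch = '0' then '1' else '0'))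
      = 2 ^ cs.length - 1 - pvParseBin cs := by
  induction cs with
  | nil => simp [pvParseBin]
  | cons c t ih =>
    have hbt : ∀ ch ∈ t, ch = '0' ∨ ch = '1' := fun ch h => hb ch (List.mem_cons_of_mem _ h)
    have hc := hb c (List.mem_cons_self ..)
    have hlt := pvParseBin_lt t
    simp only [List.map_cons, pvParseBin_cons, List.length_map, List.length_cons, ih hbt, pow_succ]
    rcases hc with hc | hc <;> simp [hc] <;> omega

-- length of bin(n)[2:]: (Nat.toDigits 2 n).length ≤ e ↔ n < 2^e, for n ≥ 1
theorem pvToDigits_len_le (n : Nat) (hn : 0 < n) :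
    ∀ e : Nat, (Nat.toDigits 2 n).length ≤ e ↔ n < 2 ^ e := by
  induction n using Nat.strong_induction_on with
  | _ n ih =>
    intro e
    rw [Nat.toDigits_eq_if (by norm_num)]
    by_cases h2 : n < 2
    · interval_cases n
      simp only [if_pos (by norm_num : (1:Nat) < 2), List.length_cons, List.length_nil]
      constructor
      · intro he; have : 1 ≤ e := he; calc (1:Nat) < 2^1 := by norm_num
          _ ≤ 2 ^ e := Nat.pow_le_pow_right (by norm_num) this
      · intro he
        by_contra hc
        push_neg at hc
        interval_cases e
        · simp at he
    · rw [if_neg h2]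
      have hd : 0 < n / 2 := by omega
      have hdlt : n / 2 < n := by omega
      cases e with
      | zero =>
        simp only [List.length_append, List.length_cons, List.length_nil, pow_zero]
        omega
      | succ e' =>
        have := ih (n / 2) hdlt hd e'
        simp only [List.length_append, List.length_cons, List.length_nil]
        rw [pow_succ]
        constructor
        · intro he
          have : (Nat.toDigits 2 (n / 2)).length ≤ e' := by omega
          have := (ih (n / 2) hdlt hd e').mp this
          omega
        · intro he
          have : n / 2 < 2 ^ e' := by omega
          have := (ih (n / 2) hdlt hd e').mpr this
          omega

theorem pvToDigits_pow2 (k : Nat) :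
    Nat.toDigits 2 (2 ^ k) = '1' :: List.replicate k '0' := by
  induction k with
  | zero =>
    rw [pow_zero, Nat.toDigits_of_lt_base (by norm_num)]
    rfl
  | succ k ih =>
    have hle : (2:Nat) ≤ 2 ^ (k + 1) := by
      calc (2:Nat) = 2 ^ 1 := by norm_num
        _ ≤ 2 ^ (k + 1) := Nat.pow_le_pow_right (by norm_num) (by omega)
    have h1 : 2 ^ (k + 1) / 2 = 2 ^ k := by rw [pow_succ]; omega
    have h2 : 2 ^ (k + 1) % 2 = 0 := by rw [pow_succ]; omega
    have h0 : Nat.digitChar 0 = '0' := rfl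
    rw [Nat.toDigits_of_base_le (by norm_num) hle, h1, h2, ih, h0, List.replicate_succ']
    simp

theorem pvPadFold (p : Nat) (com : List Char) :
    (List.range p).foldl (fun s _ => '0' :: s) com = List.replicate p '0' ++ com := by
  induction p with
  | zero => simp
  | succ p ih =>
    rw [List.range_succ, List.foldl_append, ih, List.replicate_succ]
    simp

-- ===== VERDICT (by name: the statement is the Claim_ definition above) =====
theorem com2ori_spec : Claim_equal_com2ori := by
  intro ori_str _ hpre
  obtain ⟨hne, hcase⟩ := hpre
  unfold Spec_com2ori
  cases h : ori_str.toList with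
  | nil => exact absurd h hne
  | cons c t =>
    rw [h] at hcase
    rcases hcase with h0 | ⟨h1, hbinb⟩
    · -- first char '0': both return ori_str
      simp only [List.head?_cons, Option.some.injEq] at h0
      simp [com2ori, com2ori_alt, h, h0]
    · simp only [List.head?_cons, Option.some.injEq] at h1
      subst h1
      have hbin : ∀ ch ∈ '1' :: t, ch = '0' ∨ ch = '1' := by
        intro ch hm
        have := List.all_eq_true.mp hbinb ch hm
        simpa using this
      have hbt : ∀ ch ∈ t, ch = '0' ∨ ch = '1' :=
        fun ch hm => hbin ch (List.mem_cons_of_mem _ hm)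
      have hlt := pvParseBin_lt t
      -- A's value_str is the char-wise inversion
      have hfold : ('1' :: t).foldl (fun acc ch => acc ++ [if ch = '0' then '1' else '0']) []
          = ('1' :: t).map (fun ch => if ch = '0' then '1' else '0') :=
        PySem.List.foldl_append_singleton_eq_map ..
      -- n (A) = mag (B) = 2^|t| - parse t
      have hparse_inv : pvParseBin (('1' :: t).map (fun ch => if ch = '0' then '1' else '0'))
          = 2 ^ (t.length + 1) - 1 - pvParseBin ('1' :: t) := by
        have := pvParseBin_inv ('1' :: t) hbin
        simpa using this
      have hcons : pvParseBin ('1' :: t) = 2 ^ t.length + pvParseBin t := by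
        rw [pvParseBin_cons]; simp
      have hn : pvParseBin (('1' :: t).map (fun ch => if ch = '0' then '1' else '0')) + 1
          = 2 ^ t.length - pvParseBin t := by
        rw [hparse_inv, hcons, pow_succ]; omega
      have hmag : 2 ^ ('1' :: t).length - pvParseBin ('1' :: t) = 2 ^ t.length - pvParseBin t := by
        rw [hcons]; simp only [List.length_cons, pow_succ]; omega
      set n := 2 ^ t.length - pvParseBin t with hndef
      have hn1 : 0 < n := by omega
      have hnle : n ≤ 2 ^ t.length := by omega
      have hlen := pvToDigits_len_le n hn1
      simp only [com2ori, com2ori_alt, h, PySem.List.pyGet?_zero_cons]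
      simp only [if_neg (by decide : ¬ ('1' : Char) = '0'), hfold, hn, hmag]
      simp only [List.length_cons, if_true, Nat.add_sub_cancel]
      by_cases hcarry : n = 2 ^ t.length
      · -- carry into the sign bit ↔ B's most-negative case
        have hA : (Nat.toDigits 2 n).length ≥ t.length + 1 := by
          by_contra hcl
          have := (hlen t.length).mp (by omega)
          omega
        rw [if_pos hA, if_pos hcarry, hcarry, pvToDigits_pow2]
        simp [List.replicate_succ]
      · -- no carry: '1' + zero padding + digits on both sides
        have hnlt : n < 2 ^ t.length := by omega
        have hlenle : (Nat.toDigits 2 n).length ≤ t.length := (hlen t.length).mpr hnlt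
        rw [if_neg (by omega), if_neg hcarry, pvPadFold]
        have hp : t.length + 1 - (Nat.toDigits 2 n).length - 1
            = t.length - (Nat.toDigits 2 n).length := by omega
        rw [hp]
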